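-- pv_equiv track=rewrite | github.com/AlejandroFernandezLuces/TFG | TxtToCsv.py | get_tables_index
-- ===== SOURCE A (Python) =====
-- def get_tables_index(lines):
--     """
--         The files are in TXT form, and they have one table per sensor, with some
--         text in between tables in between, so we need to know where each table
--         starts and ends. Also, to seize the iteration of the file and with
--         efficiency in mind, we also get the association between sensor codes
--         and names.
--         :param txt_path: Path to the TXT
--         :return: List of pairs where the first element is the start index of the
--         table, and the second is the end index, and a dictionary with the sensor
--         code and its name.
--     """
--
--     line_counter = 0
--     start_lines = []
--     end_lines = []
--     code_name_assoc = {}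
--
--     for line in lines:
--         # Gets the association between sensor names and codes
--         if "Transponder: " in line:
--             code = line
--             code = code.replace("Transponder: ", "")
--             name = lines[line_counter + 1]
--             if "Placement: " in name:
--                 name = name.replace("Placement: ", "")
--                 code_name_assoc[code] = name
--
--         # Gets the starting index of the table
--         if "Code" in line:
--             start_lines.append(line_counter)
--
--         # Gets the ending index candidates of the table, getting all the
--         if line[0] == "\n":
--             end_lines.append(line_counter)
--         line_counter += 1
--     # This line is needed because there is no \n in the end of the file,
--     # and we need some way to indicate it
--     end_lines.append(len(lines) - 1)
--
--     start_end_index = []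
--     # Associates the start indices with its end indices
--     for i in range(len(start_lines)):
--         j = 0
--         while start_lines[i] > end_lines[j] and j < len(end_lines) - 1:
--             j += 1
--         start_end_index.append([start_lines[i], end_lines[j]])
--     return start_end_index, code_name_assoc
-- ===== SOURCE B (Python) =====
-- def _bisect_left(a, x):
--     # hand-rolled bisect_left (A's module imports nothing)
--     lo, hi = 0, len(a)
--     while lo < hi:
--         mid = (lo + hi) // 2
--         if a[mid] < x:
--             lo = mid + 1
--         else:
--             hi = mid
--     return lo
--
--
-- def get_tables_index(lines):
--     # Staged passes: three comprehensions build starts, ends and the sensor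
--     # map (pairing each line with its successor via zip instead of indexing),
--     # then each start is matched to its end by binary search over the sorted
--     # end list instead of a per-start linear rescan.
--     starts = [i for i, l in enumerate(lines) if "Code" in l]
--     ends = [i for i, l in enumerate(lines) if l[0] == "\n"]
--     ends.append(len(lines) - 1)
--     assoc = {
--         a.replace("Transponder: ", ""): b.replace("Placement: ", "")
--         for a, b in zip(lines, lines[1:])
--         if "Transponder: " in a and "Placement: " in b
--     }
--     pairs = [[s, ends[min(_bisect_left(ends, s), len(ends) - 1)]] for s in starts]
--     return pairs, assoc
-- ===== Notes on version B (the rewrite author's own statement) =====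
-- stated objective: alternative
-- what changed: B builds starts/ends/sensor-map in staged comprehensions (pairing each line with its successor via zip instead of indexing lines[i+1]) and matches each table start to its end by binary search over the sorted end list instead of A's per-start linear rescan from index 0.
import Mathlib
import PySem

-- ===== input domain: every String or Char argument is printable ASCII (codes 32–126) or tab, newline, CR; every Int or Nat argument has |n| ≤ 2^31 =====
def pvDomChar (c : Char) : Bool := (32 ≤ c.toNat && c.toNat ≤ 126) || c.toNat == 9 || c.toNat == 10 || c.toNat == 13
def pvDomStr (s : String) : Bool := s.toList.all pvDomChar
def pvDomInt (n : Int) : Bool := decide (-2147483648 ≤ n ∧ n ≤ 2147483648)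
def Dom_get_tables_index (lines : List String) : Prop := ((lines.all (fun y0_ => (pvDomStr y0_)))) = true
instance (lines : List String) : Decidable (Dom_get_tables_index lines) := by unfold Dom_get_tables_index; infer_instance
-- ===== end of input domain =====

-- B builds starts/ends/sensor-map in staged comprehensions (zip with the successor instead of
-- indexing lines[i+1]) and pairs each start with its end by binary search over the sorted end list
-- instead of A's per-start linear rescan.

-- ===== PORT A =====
-- state: (line_counter, start_lines, end_lines, code_name_assoc)
def stepA (lines : List String) (st : Int × List Int × List Int × PySem.Dict String String)
    (line : String) : Int × List Int × List Int × PySem.Dict String String :=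
  match st with
  | (i, starts, ends, assoc) =>
    let assoc :=
      if PySem.Str.isIn "Transponder: " line then
        let code := PySem.Str.replace line "Transponder: " ""
        -- lines[line_counter + 1]: IndexError (none) only outside Pre_
        let name := (PySem.List.pyGet? lines (i + 1)).getD ""
        if PySem.Str.isIn "Placement: " name then
          assoc.insert code (PySem.Str.replace name "Placement: " "")
        else assoc
      else assoc
    let starts := if PySem.Str.isIn "Code" line then starts ++ [i] else starts
    -- line[0] == "\n": IndexError (none) on "" only outside Pre_
    let ends := if PySem.Str.pyGet? line 0 = some '\n' then ends ++ [i] else ends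
    (i + 1, starts, ends, assoc)

-- A's inner while loop: j = 0; while start > end_lines[j] and j < len(end_lines)-1: j += 1
def whileA (ends : List Int) (s : Int) (j : Nat) : Nat :=
  if s > ends.getD j 0 ∧ j < ends.length - 1 then whileA ends s (j + 1) else j
termination_by ends.length - j
decreasing_by omega

def get_tables_index (lines : List String) : List (List Int) × (List (String × String)) :=
  let st := lines.foldl (stepA lines) (0, [], [], PySem.Dict.empty)
  let ends := st.2.2.1 ++ [(lines.length : Int) - 1]
  let pairs := st.2.1.foldl (fun res s => res ++ [[s, ends.getD (whileA ends s 0) 0]]) []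
  (pairs, st.2.2.2.items)

-- ===== PORT B =====
-- hand-rolled bisect_left of Source B: while lo < hi: mid = (lo+hi)//2; …
def bisectLeft (a : List Int) (x : Int) (lo hi : Nat) : Nat :=
  if h : lo < hi then
    if a.getD ((lo + hi) / 2) 0 < x then bisectLeft a x ((lo + hi) / 2 + 1) hi
    else bisectLeft a x lo ((lo + hi) / 2)
  else lo
termination_by hi - lo
decreasing_by all_goals omega

def get_tables_index_alt (lines : List String) : List (List Int) × (List (String × String)) :=
  let enum := PySem.List.enumerate lines 0
  let starts := (enum.filter (fun p => PySem.Str.isIn "Code" p.2)).map (·.1)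
  let ends := (enum.filter (fun p => decide (PySem.Str.pyGet? p.2 0 = some '\n'))).map (·.1)
      ++ [(lines.length : Int) - 1]
  -- zip(lines, lines[1:]) = lines.zip lines.tail
  let assoc := ((lines.zip lines.tail).filter
      (fun p => PySem.Str.isIn "Transponder: " p.1 && PySem.Str.isIn "Placement: " p.2)).foldl
      (fun (d : PySem.Dict String String) p =>
        d.insert (PySem.Str.replace p.1 "Transponder: " "") (PySem.Str.replace p.2 "Placement: " ""))
      PySem.Dict.empty
  let pairs := starts.map
      (fun s => [s, ends.getD (min (bisectLeft ends s 0 ends.length) (ends.length - 1)) 0])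
  (pairs, assoc.items)

-- ===== PRECONDITION & SPEC =====
-- Pre_ excludes exactly the inputs where the Python A raises IndexError: an empty line
-- (line[0]) or a last line containing "Transponder: " (lines[line_counter + 1]).
def Pre_get_tables_index (lines : List String) : Prop :=
  (∀ l ∈ lines, l ≠ "") ∧
  PySem.Str.isIn "Transponder: " (lines.getLast?.getD "") = false
instance (lines : List String) : Decidable (Pre_get_tables_index lines) := by
  unfold Pre_get_tables_index; infer_instance

def pvWitness_get_tables_index : List String :=
  ["Transponder: A1", "Placement: head", "Code  Count", "a 1", "\n", "text"]

def Spec_get_tables_index (lines : List String) (out : List (List Int) × (List (String × String))) : Prop := out = get_tables_index_alt lines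
instance (lines : List String) (out : List (List Int) × (List (String × String))) : Decidable (Spec_get_tables_index lines out) := by unfold Spec_get_tables_index; infer_instance

-- ===== CLAIM (what is proved, stated in full; the proofs are below) =====
def Claim_equal_get_tables_index : Prop := ∀ (lines : List String), Dom_get_tables_index lines → Pre_get_tables_index lines → Spec_get_tables_index lines (get_tables_index lines)

-- ===== LEMMAS AND PROOFS =====

-- B's conditional dict step, used to fuse Source B's filter with its fold
def bAssoc (d : PySem.Dict String String) (p : String × String) : PySem.Dict String String :=
  if PySem.Str.isIn "Transponder: " p.1 && PySem.Str.isIn "Placement: " p.2 then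
    d.insert (PySem.Str.replace p.1 "Transponder: " "") (PySem.Str.replace p.2 "Placement: " "")
  else d

theorem foldl_filter_eq_foldl_bAssoc (l : List (String × String)) (d : PySem.Dict String String) :
    ((l.filter (fun p => PySem.Str.isIn "Transponder: " p.1 && PySem.Str.isIn "Placement: " p.2)).foldl
      (fun (d : PySem.Dict String String) p =>
        d.insert (PySem.Str.replace p.1 "Transponder: " "") (PySem.Str.replace p.2 "Placement: " ""))
      d) = l.foldl bAssoc d := by
  induction l generalizing d with
  | nil => rfl
  | cons x xs ih =>
    by_cases h : (PySem.Str.isIn "Transponder: " x.1 && PySem.Str.isIn "Placement: " x.2) = true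
    · simp only [List.filter_cons, h, if_true, List.foldl_cons, bAssoc, if_pos h]
      exact ih _
    · simp only [List.filter_cons, h, if_false, List.foldl_cons, bAssoc, if_neg h]
      exact ih _

-- one-pass A fold = B's staged lists (over any suffix rest of lines, starting at index pre.length)
set_option maxHeartbeats 1000000 in
theorem scan_eq (lines : List String) :
    ∀ (rest pre : List String) (s e : List Int) (d : PySem.Dict String String),
    lines = pre ++ rest →
    rest.foldl (stepA lines) ((pre.length : Int), s, e, d) =
      (((pre.length : Int) + rest.length),
       s ++ ((PySem.List.enumerate rest (pre.length : Int)).filter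
              (fun p => PySem.Str.isIn "Code" p.2)).map (·.1),
       e ++ ((PySem.List.enumerate rest (pre.length : Int)).filter
              (fun p => decide (PySem.Str.pyGet? p.2 0 = some '\n'))).map (·.1),
       (rest.zip rest.tail).foldl bAssoc d) := by
  intro rest
  induction rest with
  | nil =>
    intro pre s e d h
    simp [PySem.List.enumerate_nil]
  | cons x xs ih =>
    intro pre s e d h
    -- the lookahead lines[pre.length + 1] is the head of xs (or "" past the end)
    have hlook : (PySem.List.pyGet? lines ((pre.length : Int) + 1)).getD "" = xs.head?.getD "" := by
      subst h
      have : ((pre.length : Int) + 1) = ((pre.length + 1 : Nat) : Int) := by push_cast; ring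
      rw [this, PySem.List.pyGet?_natCast]
      rw [List.getElem?_append_right (by omega)]
      cases xs <;> simp
    have hcnt : (pre.length : Int) + 1 = (((pre ++ [x]).length : Nat) : Int) := by simp
    have hA : stepA lines ((pre.length : Int), s, e, d) x
        = (((pre ++ [x]).length : Int),
           (if PySem.Str.isIn "Code" x then s ++ [(pre.length : Int)] else s),
           (if PySem.Str.pyGet? x 0 = some '\n' then e ++ [(pre.length : Int)] else e),
           ((x :: xs).zip xs).take 1 |>.foldl bAssoc d) := by
      simp only [stepA]
      rw [hlook, hcnt]
      cases xs with
      | nil =>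
        simp only [List.head?_nil, Option.getD_none, List.zip_nil_right, List.take_nil,
          List.foldl_nil]
        rw [if_neg (show ¬ PySem.Str.isIn "Placement: " "" = true by decide)]
        simp only [ite_self]
      | cons y ys =>
        simp only [List.head?_cons, Option.getD_some, List.zip_cons_cons, List.take_succ_cons,
          List.take_zero, List.foldl_cons, List.foldl_nil, bAssoc, Bool.and_eq_true]
        split_ifs <;> tauto
    rw [List.foldl_cons, hA, ih (pre ++ [x]) _ _ _ (by simpa using h)]
    rw [PySem.List.enumerate_cons]
    refine Prod.ext ?_ (Prod.ext ?_ (Prod.ext ?_ ?_)) <;> simp only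
    · push_cast; simp; ring
    · rw [← hcnt]
      split_ifs with hc <;>
        (try simp at hc) <;> simp [List.filter_cons, hc]
    · rw [← hcnt]
      split_ifs with hc <;>
        (try simp [PySem.Str.pyGet?_eq] at hc) <;> simp [List.filter_cons, hc]
    · cases xs with
      | nil => simp
      | cons y ys => simp [List.zip_cons_cons]

-- first index of ends whose value is ≥ s (length if none): the value both loops compute
def firstGE (s : Int) : List Int → Nat
  | [] => 0
  | e :: es => if s ≤ e then 0 else firstGE s es + 1

theorem firstGE_le_length (s : Int) (l : List Int) : firstGE s l ≤ l.length := by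
  induction l with
  | nil => simp [firstGE]
  | cons e es ih => simp only [firstGE]; split <;> simp <;> omega

theorem firstGE_lt (s : Int) (l : List Int) :
    ∀ i < firstGE s l, l.getD i 0 < s := by
  induction l with
  | nil => intro i h; simp [firstGE] at h
  | cons e es ih =>
    intro i h
    simp only [firstGE] at h
    split at h
    · omega
    · cases i with
      | zero => simpa using by omega
      | succ k => exact ih k (by omega)

theorem firstGE_ge (s : Int) (l : List Int) (h : firstGE s l < l.length) :
    s ≤ l.getD (firstGE s l) 0 := by
  induction l with
  | nil => simp at h
  | cons e es ih =>
    by_cases hse : s ≤ e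
    · simpa [firstGE, hse] using hse
    · simp only [firstGE, if_neg hse, List.getD_cons_succ]
      apply ih
      simp only [firstGE, if_neg hse, List.length_cons] at h
      omega

theorem firstGE_eq_of (s : Int) (l : List Int) (j : Nat) (hj : j ≤ l.length)
    (hlt : ∀ i < j, l.getD i 0 < s) (hge : j < l.length → s ≤ l.getD j 0) :
    firstGE s l = j := by
  induction l generalizing j with
  | nil => simp at hj; simp [firstGE, hj]
  | cons e es ih =>
    cases j with
    | zero =>
      have : s ≤ e := by simpa using hge (by simp)
      simp [firstGE, this]
    | succ k =>
      have he : e < s := by simpa using hlt 0 (by omega)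
      have : ¬ s ≤ e := by omega
      simp only [firstGE, if_neg this]
      have := ih k (by simpa using hj)
        (fun i hi => by simpa using hlt (i + 1) (by omega))
        (fun hk => by simpa using hge (by simpa using hk))
      omega

-- A's while loop computes min(firstGE, len-1)
theorem whileA_eq (ends : List Int) (s : Int) (hne : ends ≠ []) :
    whileA ends s 0 = min (firstGE s ends) (ends.length - 1) := by
  have hlen : 1 ≤ ends.length := by
    cases ends with
    | nil => exact absurd rfl hne
    | cons _ _ => simp
  have key : ∀ (n j : Nat), ends.length - j ≤ n → j ≤ min (firstGE s ends) (ends.length - 1) →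
      whileA ends s j = min (firstGE s ends) (ends.length - 1) := by
    intro n
    induction n with
    | zero =>
      intro j h hj
      have hfl := firstGE_le_length s ends
      have : j = min (firstGE s ends) (ends.length - 1) := by omega
      subst this
      rw [whileA, if_neg]
      intro ⟨h1, h2⟩
      have hk : min (firstGE s ends) (ends.length - 1) = firstGE s ends := by omega
      rw [hk] at h1
      have := firstGE_ge s ends (by omega)
      omega
    | succ n ih =>
      intro j h hj
      rcases Nat.eq_or_lt_of_le hj with heq | hlt
      · subst heq
        rw [whileA, if_neg]
        intro ⟨h1, h2⟩
        have hfl := firstGE_le_length s ends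
        have hk : min (firstGE s ends) (ends.length - 1) = firstGE s ends := by omega
        rw [hk] at h1
        have := firstGE_ge s ends (by omega)
        omega
      · have hcond : s > ends.getD j 0 ∧ j < ends.length - 1 := by
          constructor
          · exact firstGE_lt s ends j (by omega)
          · omega
        rw [whileA, if_pos hcond]
        exact ih (j + 1) (by omega) (by omega)
  exact key ends.length 0 (by omega) (by omega)

-- Source B's binary search computes firstGE, given the list is nondecreasing
theorem getD_mono (l : List Int) (hsort : l.Pairwise (· ≤ ·)) (i j : Nat)
    (hij : i ≤ j) (hj : j < l.length) : l.getD i 0 ≤ l.getD j 0 := by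
  rcases Nat.eq_or_lt_of_le hij with rfl | hlt
  · exact le_refl _
  · rw [List.getD_eq_getElem l 0 (by omega), List.getD_eq_getElem l 0 hj]
    exact List.pairwise_iff_getElem.1 hsort i j (by omega) hj hlt

theorem bisectLeft_eq (ends : List Int) (s : Int)
    (hsort : ends.Pairwise (· ≤ ·)) :
    bisectLeft ends s 0 ends.length = firstGE s ends := by
  have key : ∀ (n lo hi : Nat), hi - lo ≤ n → lo ≤ hi → hi ≤ ends.length →
      (∀ i < lo, ends.getD i 0 < s) →
      (∀ i, hi ≤ i → i < ends.length → s ≤ ends.getD i 0) →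
      bisectLeft ends s lo hi = firstGE s ends := by
    intro n
    induction n with
    | zero =>
      intro lo hi h hle hhi hlt hge
      have : ¬ lo < hi := by omega
      rw [bisectLeft, dif_neg this]
      exact (firstGE_eq_of s ends lo (by omega) hlt
        (fun hl => hge lo (by omega) hl)).symm
    | succ n ih =>
      intro lo hi h hle hhi hlt hge
      by_cases hc : lo < hi
      · rw [bisectLeft, dif_pos hc]
        by_cases hm : ends.getD ((lo + hi) / 2) 0 < s
        · rw [if_pos hm]
          apply ih ((lo + hi) / 2 + 1) hi (by omega) (by omega) hhi
          · intro i hi2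
            exact lt_of_le_of_lt (getD_mono ends hsort i ((lo + hi) / 2) (by omega) (by omega)) hm
          · exact hge
        · rw [if_neg hm]
          apply ih lo ((lo + hi) / 2) (by omega) (by omega) (by omega) hlt
          intro i h1 h2
          exact le_trans (by omega) (getD_mono ends hsort ((lo + hi) / 2) i h1 h2)
      · rw [bisectLeft, dif_neg hc]
        exact (firstGE_eq_of s ends lo (by omega) hlt
          (fun hl => hge lo (by omega) hl)).symm
  exact key ends.length 0 ends.length (by omega) (by omega) (le_refl _) (by omega)
    (fun i h1 h2 => by omega)

-- B's end list is nondecreasing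
theorem ends_sorted (lines : List String) :
    (((PySem.List.enumerate lines (0 : Int)).filter
        (fun p => decide (PySem.Str.pyGet? p.2 0 = some '\n'))).map (·.1)
      ++ [(lines.length : Int) - 1]).Pairwise (· ≤ ·) := by
  rw [List.pairwise_append]
  refine ⟨?_, by simp, ?_⟩
  · rw [List.pairwise_map]
    exact ((PySem.List.pairwise_lt_enumerate lines 0).filter _).imp (fun h => le_of_lt h)
  · intro a ha b hb
    simp only [List.mem_singleton] at hb
    subst hb
    simp only [List.mem_map] at ha
    obtain ⟨p, hp, rfl⟩ := ha
    have hpe := List.mem_of_mem_filter hp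
    rw [PySem.List.mem_enumerate_iff] at hpe
    obtain ⟨k, hk, rfl⟩ := hpe
    simp only [zero_add]
    omega

-- ===== VERDICT (by name: the statement is the Claim_ definition above) =====
theorem get_tables_index_spec : Claim_equal_get_tables_index := by
  intro lines _hd _hp
  unfold Spec_get_tables_index
  have hs := scan_eq lines lines [] [] [] PySem.Dict.empty (by simp)
  simp only [List.length_nil, Nat.cast_zero, List.nil_append] at hs
  simp only [get_tables_index, get_tables_index_alt, hs, foldl_filter_eq_foldl_bAssoc,
    PySem.List.foldl_append_singleton_eq_map, List.nil_append]
  refine Prod.ext ?_ rfl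
  simp only
  apply List.map_congr_left
  intro s _
  have hE : (((PySem.List.enumerate lines (0 : Int)).filter
      (fun p => decide (PySem.Str.pyGet? p.2 0 = some '\n'))).map (·.1)
      ++ [(lines.length : Int) - 1]) ≠ [] := by simp
  rw [whileA_eq _ s hE, bisectLeft_eq _ s (ends_sorted lines)]
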